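-- pv_equiv track=rewrite | github.com/TheRambler/nybbler | nybbler.py | pack_nybbles
-- ===== SOURCE A (Python) =====
-- def raw_bin(byte):
-- 	"""Convert and integer to binary, and strip off the 0b prefix"""
-- 	return bin(byte).replace("0b","")
--
-- def expand(a, l):
-- 	"""Expand a big-endian binary string (a) to l places. Nothing happens if a is longer than l."""
-- 	return ("0"*(l-len(a)))+a
--
-- def _pack_two_nybbles(nybbles):
-- 	nybble_1=expand(raw_bin(nybbles[0]),4)
-- 	nybble_2=expand(raw_bin(nybbles[1]),4)
-- 	return chr(int(nybble_1+nybble_2,2))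
--
-- def pack_nybbles(nybbles, null_nybble):
-- 	"""Pack a string of nybble-ints into characters"""
-- 	last_nybble=-1
-- 	packed=""
-- 	for nybble in nybbles:
-- 		if last_nybble==-1:
-- 			last_nybble=nybble
-- 		else:
-- 			packed+=_pack_two_nybbles([last_nybble,nybble])
-- 			last_nybble=-1
-- 	if last_nybble!=-1:
-- 		packed+=_pack_two_nybbles([last_nybble,null_nybble])
-- 	return packed
-- ===== SOURCE B (Python) =====
-- def pack_nybbles(nybbles, null_nybble):
-- 	"""Pack a string of nybble-ints into characters"""
-- 	pending = list(nybbles) if len(nybbles) % 2 == 0 else nybbles + [null_nybble]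
-- 	chars = []
-- 	while pending:
-- 		a, b, *pending = pending
-- 		chars.append(chr(16 * a + b))
-- 	return "".join(chars)
-- ===== Notes on version B (the rewrite author's own statement) =====
-- stated objective: simpler
-- what changed: B pads the list to even length with null_nybble once and packs consecutive pairs arithmetically with chr(16*a + b), replacing A's -1 toggle sentinel and its binary-string format/pad/parse round-trip per pair.
-- outside the precondition, e.g. on pack_nybbles([1, 16], 0): A returns '0', B returns ' '; on pack_nybbles([-1], 0): A returns '', B raises ValueError
import Mathlib
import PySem

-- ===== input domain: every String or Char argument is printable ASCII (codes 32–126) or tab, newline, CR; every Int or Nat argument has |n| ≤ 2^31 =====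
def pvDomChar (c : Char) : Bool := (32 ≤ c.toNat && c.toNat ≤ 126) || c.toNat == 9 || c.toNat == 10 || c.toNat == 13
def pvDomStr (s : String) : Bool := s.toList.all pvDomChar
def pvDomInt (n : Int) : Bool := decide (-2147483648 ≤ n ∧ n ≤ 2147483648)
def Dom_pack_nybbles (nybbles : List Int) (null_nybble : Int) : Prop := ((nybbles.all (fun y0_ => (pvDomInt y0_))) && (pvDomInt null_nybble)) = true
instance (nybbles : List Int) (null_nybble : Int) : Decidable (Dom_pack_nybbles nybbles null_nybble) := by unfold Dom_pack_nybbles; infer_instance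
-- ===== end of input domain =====

-- B packs consecutive pairs of the null-padded list arithmetically with chr(16*a+b), replacing A's
-- -1 toggle sentinel and its per-pair binary-string format/pad/parse round-trip (objective: simpler).


-- ===== PORT A =====
-- chr(n): exact for codes 0..255 (all that Pre_ admits); Python raises ValueError outside
-- range(0x110000), here none.  (For surrogate codepoints Lean's Char has no value; outside Pre_.)
def pyChr? (n : Int) : Option Char :=
  if 0 ≤ n ∧ n < 1114112 then some (Char.ofNat n.toNat) else none

-- raw_bin: bin(byte).replace("0b","") — bin's digits with a leading '-' for negatives contain a
-- single "0b", so the replace yields exactly PySem.Int.toBinChars (= format(byte,'b')).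
def raw_bin (byte : Int) : List Char := PySem.Int.toBinChars byte

def expand (a : List Char) (l : Nat) : List Char :=
  List.replicate (l - a.length) '0' ++ a

-- _pack_two_nybbles: Option Char; none exactly where int(...,2) or chr raises (excluded by Pre_).
def pack_two_nybbles? (n1 n2 : Int) : Option Char :=
  ((PySem.Int.ofCharsBase? (expand (raw_bin n1) 4 ++ expand (raw_bin n2) 4) 2).bind pyChr?)

-- one step of A's for-loop over state (last_nybble, packed)
def packStep (st : Int × List Char) (nybble : Int) : Int × List Char :=
  if st.1 = -1 then (nybble, st.2)
  else (-1, st.2 ++ ((pack_two_nybbles? st.1 nybble).elim [] (fun c => [c])))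

-- A's post-loop tail guard
def packFinish (null_nybble : Int) (st : Int × List Char) : List Char :=
  if st.1 ≠ -1 then st.2 ++ ((pack_two_nybbles? st.1 null_nybble).elim [] (fun c => [c]))
  else st.2

def pack_nybbles (nybbles : List Int) (null_nybble : Int) : String :=
  String.mk (packFinish null_nybble (nybbles.foldl packStep (-1, [])))

-- ===== PORT B =====
-- chr(16*a+b) (in range under Pre_; B raises outside, excluded)
def chr16 (a b : Int) : Char := Char.ofNat (16 * a + b).toNat

-- B's while loop: a, b, *pending = pending (the one-element case is Python's ValueError,
-- unreachable: the padded list always has even length)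
def altLoop : List Int → List Char
  | a :: b :: pending => chr16 a b :: altLoop pending
  | _ => []

def pack_nybbles_alt (nybbles : List Int) (null_nybble : Int) : String :=
  String.mk (altLoop (if nybbles.length % 2 = 0 then nybbles else nybbles ++ [null_nybble]))

-- ===== PRECONDITION & SPEC =====
-- Pre_ restricts to the natural nybble domain 0..15 (null_nybble only when it is used, i.e. on odd
-- length): outside it A raises on most negative values, silently drops -1s hitting its toggle
-- sentinel, and for values > 15 returns accidental characters built from over-long binary strings.
def Pre_pack_nybbles (nybbles : List Int) (null_nybble : Int) : Prop :=
  (∀ x ∈ nybbles, 0 ≤ x ∧ x < 16) ∧ (nybbles.length % 2 = 1 → 0 ≤ null_nybble ∧ null_nybble < 16)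
instance (nybbles : List Int) (null_nybble : Int) : Decidable (Pre_pack_nybbles nybbles null_nybble) := by unfold Pre_pack_nybbles; infer_instance

def pvWitness_pack_nybbles : List Int × Int := ([5, 3, 7], 2)

def Spec_pack_nybbles (nybbles : List Int) (null_nybble : Int) (out : String) : Prop := out = pack_nybbles_alt nybbles null_nybble
instance (nybbles : List Int) (null_nybble : Int) (out : String) : Decidable (Spec_pack_nybbles nybbles null_nybble out) := by unfold Spec_pack_nybbles; infer_instance

-- ===== CLAIM (what is proved, stated in full; the proofs are below) =====
def Claim_equal_pack_nybbles : Prop := ∀ (nybbles : List Int) (null_nybble : Int), Dom_pack_nybbles nybbles null_nybble → Pre_pack_nybbles nybbles null_nybble → Spec_pack_nybbles nybbles null_nybble (pack_nybbles nybbles null_nybble)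

-- ===== LEMMAS AND PROOFS =====

-- A's binary-string pack agrees with B's arithmetic chr on genuine nybbles (0..15), by enumeration
theorem pack_two_nat : ∀ a : Nat, a < 16 → ∀ b : Nat, b < 16 →
    pack_two_nybbles? (a : Int) (b : Int) = some (Char.ofNat (16 * a + b)) := by decide

theorem pack_two_eq (a b : Int) (ha : 0 ≤ a ∧ a < 16) (hb : 0 ≤ b ∧ b < 16) :
    pack_two_nybbles? a b = some (chr16 a b) := by
  obtain ⟨m, rfl⟩ := Int.eq_ofNat_of_zero_le ha.1
  obtain ⟨k, rfl⟩ := Int.eq_ofNat_of_zero_le hb.1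
  have hm : m < 16 := by exact_mod_cast ha.2
  have hk : k < 16 := by exact_mod_cast hb.2
  rw [pack_two_nat m hm k hk, chr16, show ((16 * (m : Int) + k)).toNat = 16 * m + k from by omega]

-- the toggle loop, started with sentinel -1 and accumulator acc, produces acc ++ B's pairwise chars
theorem loop_eq (nn : Int) : ∀ (l : List Int) (acc : List Char),
    (∀ x ∈ l, 0 ≤ x ∧ x < 16) → (l.length % 2 = 1 → 0 ≤ nn ∧ nn < 16) →
    packFinish nn (l.foldl packStep (-1, acc)) =
      acc ++ altLoop (if l.length % 2 = 0 then l else l ++ [nn])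
  | [], acc, _, _ => by simp [packFinish, altLoop]
  | [a], acc, h, hn => by
      have ha := h a (by simp)
      have hnn := hn (by simp)
      have hane : (a : Int) ≠ -1 := by omega
      simp only [List.foldl_cons, List.foldl_nil]
      rw [show packStep (-1, acc) a = (a, acc) from by simp [packStep]]
      simp [packFinish, hane, pack_two_eq a nn ha hnn, altLoop]
  | a :: b :: rest, acc, h, hn => by
      have ha := h a (by simp)
      have hb := h b (by simp)
      have hane : (a : Int) ≠ -1 := by omega
      have ih := loop_eq nn rest (acc ++ [chr16 a b])
        (fun x hx => h x (by simp [hx]))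
        (by intro h1; apply hn; simp [Nat.add_mod, h1])
      simp only [List.foldl_cons]
      rw [show packStep (-1, acc) a = (a, acc) from by simp [packStep],
          show packStep (a, acc) b = (-1, acc ++ [chr16 a b]) from by
            simp [packStep, hane, pack_two_eq a b ha hb]]
      rw [ih]
      have hmod : (a :: b :: rest).length % 2 = rest.length % 2 := by
        simp only [List.length_cons]; omega
      by_cases hp : rest.length % 2 = 0
      · rw [if_pos hp, if_pos (by omega : (a :: b :: rest).length % 2 = 0)]
        simp [altLoop]
      · rw [if_neg hp, if_neg (by omega : ¬ (a :: b :: rest).length % 2 = 0)]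
        simp [altLoop]
termination_by l => l.length

-- ===== VERDICT (by name: the statement is the Claim_ definition above) =====
theorem pack_nybbles_spec : Claim_equal_pack_nybbles := by
  intro nybbles null_nybble _ hpre
  unfold Spec_pack_nybbles pack_nybbles pack_nybbles_alt
  rw [loop_eq null_nybble nybbles [] hpre.1 hpre.2]
  simp
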